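-- pv_equiv track=rewrite | github.com/faderskd/algorithms | dictionaries.py | find_largest_word
-- ===== SOURCE A (Python) =====
-- def find_largest_word(word, set_words):
--     counters = {w: 0 for w in set_words}
--     for c in word:
--         for w in set_words:
--             if counters[w] < len(w) and w[counters[w]] == c:
--                 counters[w] += 1
--     max_w = ""
--     for w, c in counters.items():
--         if len(w) == c:
--             max_w = max(w, max_w, key=lambda k: len(k))
--     return max_w
-- ===== SOURCE B (Python) =====
-- def _is_subsequence(w, word):
--     it = iter(word)
--     return all(c in it for c in w)
--
--
-- def find_largest_word(word, set_words):
--     best = ""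
--     for w in set_words:
--         if len(w) >= len(best) and _is_subsequence(w, word):
--             best = w
--     return best
-- ===== Notes on version B (the rewrite author's own statement) =====
-- stated objective: alternative
-- what changed: A streams word once, advancing a dict of per-candidate counters in an inner scan of set_words per character; B drops the dict and inverts the loop nesting, checking each candidate independently with an iterator-consuming subsequence scan behind a cheap length filter that skips candidates shorter than the current best.
-- outside the precondition, e.g. on find_largest_word('a', ['aa', 'aa']): A returns 'aa', B returns ''; on find_largest_word('ab', ['a', 'b', 'a']): A returns 'b', B returns 'a'
import Mathlib
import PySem

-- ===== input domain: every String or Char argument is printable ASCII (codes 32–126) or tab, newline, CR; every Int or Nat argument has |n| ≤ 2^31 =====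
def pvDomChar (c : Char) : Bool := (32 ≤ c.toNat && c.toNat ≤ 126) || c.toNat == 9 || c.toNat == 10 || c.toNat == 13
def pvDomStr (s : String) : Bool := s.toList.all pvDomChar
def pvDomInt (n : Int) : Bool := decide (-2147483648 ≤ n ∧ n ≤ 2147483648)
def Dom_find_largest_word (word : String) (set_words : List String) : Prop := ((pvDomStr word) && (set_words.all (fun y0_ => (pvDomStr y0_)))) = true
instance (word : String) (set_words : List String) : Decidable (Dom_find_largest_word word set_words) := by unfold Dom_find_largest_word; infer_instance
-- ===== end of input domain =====

-- B inverts A's loop nesting: instead of one pass over `word` advancing a dict of per-candidate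
-- counters, it checks each candidate independently with an iterator-consuming subsequence scan
-- behind a cheap length filter (objective: alternative; no dict, early exit per candidate).

-- ===== PORT A =====
-- Python's max(w, max_w, key=len): returns the FIRST argument unless the second is strictly longer.
def pyMax2ByLen (a b : String) : String :=
  if PySem.Str.len b > PySem.Str.len a then b else a

-- `counters[w]` is ported as `getD w 0`: w is always a key of counters (it was inserted for every
-- element of set_words), so no KeyError is reachable and the default is never used.
def find_largest_word (word : String) (set_words : List String) : String :=
  let counters : PySem.Dict String Int :=
    set_words.foldl (fun d w => d.insert w 0) PySem.Dict.empty
  let counters :=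
    word.toList.foldl (fun d c =>
      set_words.foldl (fun d w =>
        if d.getD w 0 < PySem.Str.len w ∧ PySem.Str.pyGet? w (d.getD w 0) = some c then
          d.insert w (d.getD w 0 + 1)
        else d) d) counters
  counters.items.foldl (fun max_w wc =>
    if PySem.Str.len wc.1 = wc.2 then pyMax2ByLen wc.1 max_w else max_w) ""

-- ===== PORT B =====
-- `c in it` on an iterator: consume elements until the first c (none = the scan fails).
def skipTo (c : Char) : List Char → Option (List Char)
  | [] => none
  | x :: xs => if x = c then some xs else skipTo c xs

-- _is_subsequence: it = iter(word); all(c in it for c in w)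
def scanSub : List Char → List Char → Bool
  | [], _ => true
  | c :: cs, ws =>
    match skipTo c ws with
    | some rest => scanSub cs rest
    | none => false

def find_largest_word_alt (word : String) (set_words : List String) : String :=
  set_words.foldl (fun best w =>
    if PySem.Str.len w ≥ PySem.Str.len best ∧ scanSub w.toList word.toList = true then w
    else best) ""

-- ===== PRECONDITION & SPEC =====
-- Pre_ excludes set_words containing a duplicate entry: the parameter stands for a set of words,
-- and on duplicate-carrying lists A's value is an artefact of its dict keyed by word — a duplicated
-- word's counter is advanced once per list occurrence on each character of `word`, so A can accept a
-- non-subsequence (e.g. ('a', ['aa','aa'])), and length ties are resolved over the deduplicated key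
-- order rather than the list order (e.g. ('ab', ['a','b','a'])); B does the natural thing there.
def Pre_find_largest_word (_word : String) (set_words : List String) : Prop :=
  set_words.Nodup
instance (word : String) (set_words : List String) : Decidable (Pre_find_largest_word word set_words) := by unfold Pre_find_largest_word; infer_instance

def pvWitness_find_largest_word : String × List String :=
  ("abpcplea", ["ale", "apple", "monkey", "plea"])

def Spec_find_largest_word (word : String) (set_words : List String) (out : String) : Prop := out = find_largest_word_alt word set_words
instance (word : String) (set_words : List String) (out : String) : Decidable (Spec_find_largest_word word set_words out) := by unfold Spec_find_largest_word; infer_instance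

-- ===== CLAIM (what is proved, stated in full; the proofs are below) =====
def Claim_equal_find_largest_word : Prop := ∀ (word : String) (set_words : List String), Dom_find_largest_word word set_words → Pre_find_largest_word word set_words → Spec_find_largest_word word set_words (find_largest_word word set_words)

-- ===== LEMMAS AND PROOFS =====

-- A's per-character, per-candidate counter update, as a function of the old counter.
def stepI (c : Char) (w : String) (v : Int) : Int :=
  if v < PySem.Str.len w ∧ PySem.Str.pyGet? w v = some c then v + 1 else v

-- the same update on Nat counters over the candidate as a char list
def stepN (c : Char) (w : List Char) (k : Nat) : Nat :=
  if w[k]? = some c then k + 1 else k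

-- A's inner loop body
def innerF (c : Char) (d : PySem.Dict String Int) (w : String) : PySem.Dict String Int :=
  if d.getD w 0 < PySem.Str.len w ∧ PySem.Str.pyGet? w (d.getD w 0) = some c then
    d.insert w (d.getD w 0 + 1)
  else d

lemma getD_initFold (l : List String) (d : PySem.Dict String Int) (u : String) :
    (l.foldl (fun d w => d.insert w 0) d).getD u 0 = if u ∈ l then 0 else d.getD u 0 := by
  induction l generalizing d with
  | nil => simp
  | cons w t ih =>
    simp only [List.foldl_cons, ih, PySem.Dict.getD_insert, List.mem_cons]
    by_cases hu : u ∈ t <;> by_cases he : u = w <;> simp [hu, he]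

lemma getD_innerFold (c : Char) (l : List String) (d : PySem.Dict String Int) (u : String)
    (hnd : l.Nodup) :
    (l.foldl (innerF c) d).getD u 0
      = if u ∈ l then stepI c u (d.getD u 0) else d.getD u 0 := by
  induction l generalizing d with
  | nil => simp
  | cons w t ih =>
    obtain ⟨hw, ht⟩ := List.nodup_cons.mp hnd
    have hgd : (innerF c d w).getD u 0
        = if u = w then stepI c u (d.getD u 0) else d.getD u 0 := by
      by_cases he : u = w
      · subst he
        simp only [innerF, stepI]
        split_ifs with h
        · simp
        · rfl
      · simp only [innerF]
        split_ifs with h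
        · simp [PySem.Dict.getD_insert, he]
        · rfl
    simp only [List.foldl_cons, ih _ ht, hgd, List.mem_cons]
    by_cases he : u = w
    · have hu : u ∉ t := he ▸ hw
      simp [he, hw]
    · by_cases hu : u ∈ t <;> simp [he, hu]

lemma getD_outerFold (cs : List Char) (S : List String) (d : PySem.Dict String Int) (u : String)
    (hu : u ∈ S) (hnd : S.Nodup) :
    (cs.foldl (fun d c => S.foldl (innerF c) d) d).getD u 0
      = cs.foldl (fun v c => stepI c u v) (d.getD u 0) := by
  induction cs generalizing d with
  | nil => rfl
  | cons c cs ih =>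
    simp only [List.foldl_cons, ih]
    rw [getD_innerFold c S d u hnd]
    simp [hu]

lemma keys_innerFold (c : Char) (l : List String) (d : PySem.Dict String Int)
    (hl : ∀ w ∈ l, w ∈ d.keys) : (l.foldl (innerF c) d).keys = d.keys := by
  induction l generalizing d with
  | nil => rfl
  | cons w t ih =>
    have hkd : (innerF c d w).keys = d.keys := by
      simp only [innerF]
      split_ifs with h
      · exact PySem.Dict.keys_insert_of_contains _ _
          ((PySem.Dict.contains_iff_mem_keys _ _).mpr (hl w (List.mem_cons_self)))
      · rfl
    simp only [List.foldl_cons, ih _ (fun x hx => hkd ▸ hl x (List.mem_cons_of_mem _ hx)), hkd]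

lemma keys_outerFold (cs : List Char) (S : List String) (d : PySem.Dict String Int)
    (hS : ∀ w ∈ S, w ∈ d.keys) :
    (cs.foldl (fun d c => S.foldl (innerF c) d) d).keys = d.keys := by
  induction cs generalizing d with
  | nil => rfl
  | cons c cs ih =>
    simp only [List.foldl_cons]
    rw [ih _ (fun w hw => (keys_innerFold c S d hS) ▸ hS w hw), keys_innerFold c S d hS]

lemma stepI_cast (c : Char) (w : String) (k : Nat) :
    stepI c w (k : Int) = (stepN c w.toList k : Int) := by
  simp only [stepI, stepN, PySem.Str.pyGet?_natCast, PySem.Str.len_eq]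
  by_cases h : w.toList[k]? = some c
  · have hk0 : k < w.toList.length := (List.getElem?_eq_some_iff.mp h).1
    have hk : (k : Int) < (w.toList.length : Int) := by exact_mod_cast hk0
    have hk' : k < w.length := by rw [← String.length_toList]; exact hk0
    simp [hk']
  · simp [h]

lemma foldI_cast (w : String) (cs : List Char) (k : Nat) :
    cs.foldl (fun v c => stepI c w v) (k : Int)
      = ((cs.foldl (fun (v : Nat) c => stepN c w.toList v) k : Nat) : Int) := by
  induction cs generalizing k with
  | nil => rfl
  | cons c cs ih => rw [List.foldl_cons, List.foldl_cons, stepI_cast, ih]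

lemma scanSub_cons_ne {a c : Char} (tl rest : List Char) (h : a ≠ c) :
    scanSub (a :: tl) (c :: rest) = scanSub (a :: tl) rest := by
  have hne : ¬ (c = a) := fun hh => h hh.symm
  simp [scanSub, skipTo, hne]

lemma foldN_iff_scanSub (w : List Char) (ws : List Char) (k : Nat) (hk : k ≤ w.length) :
    (ws.foldl (fun v c => stepN c w v) k = w.length ↔ scanSub (w.drop k) ws = true) := by
  induction ws generalizing k with
  | nil =>
    simp only [List.foldl_nil]
    rcases Nat.lt_or_eq_of_le hk with h | h
    · have hne : w.drop k ≠ [] := by simp [List.drop_eq_nil_iff]; omega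
      rcases List.exists_cons_of_ne_nil hne with ⟨a, tl, he⟩
      rw [he]
      simp [scanSub, skipTo]
      omega
    · rw [List.drop_eq_nil_iff.mpr (le_of_eq h.symm)]
      simp [h, scanSub]
  | cons c rest ih =>
    simp only [List.foldl_cons]
    by_cases hg : w[k]? = some c
    · have hlt : k < w.length := (List.getElem?_eq_some_iff.mp hg).1
      have hdrop : w.drop k = c :: w.drop (k + 1) := by
        rw [List.drop_eq_getElem_cons hlt, (List.getElem?_eq_some_iff.mp hg).2]
      rw [hdrop]
      have : stepN c w k = k + 1 := by simp [stepN, hg]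
      rw [this, ih (k + 1) hlt]
      simp [scanSub, skipTo]
    · have hstep : stepN c w k = k := by simp [stepN, hg]
      rw [hstep, ih k hk]
      rcases Nat.lt_or_eq_of_le hk with h | h
      · have hdrop : w.drop k = w[k] :: w.drop (k + 1) := List.drop_eq_getElem_cons h
        have hne : w[k] ≠ c := fun he => hg (by simp [h, he])
        rw [hdrop, scanSub_cons_ne _ _ hne]
      · simp [List.drop_eq_nil_iff.mpr (le_of_eq h.symm), scanSub]

-- A, written with the named loop body innerF (definitionally A's inner loop), equals B.
lemma portA_eq_portB (word : String) (S : List String) (hpre : S.Nodup) :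
    ((word.toList.foldl (fun d c => S.foldl (innerF c) d)
        (S.foldl (fun d w => d.insert w (0 : Int)) PySem.Dict.empty)).items.foldl
      (fun max_w wc => if PySem.Str.len wc.1 = wc.2 then pyMax2ByLen wc.1 max_w else max_w) "")
      = find_largest_word_alt word S := by
  set d0 : PySem.Dict String Int :=
    S.foldl (fun d w => d.insert w (0 : Int)) PySem.Dict.empty with hd0
  set dfin := word.toList.foldl (fun d c => S.foldl (innerF c) d) d0 with hdfin
  have hkeys0 : d0.keys = S := by
    have h1 : d0.keys = PySem.Set.update (PySem.Dict.empty : PySem.Dict String Int).keys S := by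
      rw [hd0]
      exact PySem.Dict.keys_foldl_insert S (fun _ _ => 0) PySem.Dict.empty
    rw [h1, PySem.Dict.keys_empty, PySem.Set.update_nil_left]
    exact PySem.Set.ofList_eq_self_of_nodup S hpre
  have hkeysF : dfin.keys = S := by
    rw [hdfin, keys_outerFold _ _ _ (fun w hw => hkeys0 ▸ hw), hkeys0]
  have hgd : ∀ u ∈ S, dfin.getD u 0
      = ((word.toList.foldl (fun (v : Nat) c => stepN c u.toList v) 0 : Nat) : Int) := by
    intro u hu
    rw [hdfin, getD_outerFold _ _ _ _ hu hpre, hd0, getD_initFold]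
    simp only [hu, if_pos]
    exact foldI_cast u word.toList 0
  have hitems : dfin.items = S.map (fun k => (k, dfin.getD k 0)) := by
    rw [PySem.Dict.items_eq_map_keys dfin (hkeysF ▸ hpre) 0, hkeysF]
  unfold find_largest_word_alt
  rw [hitems, List.foldl_map]
  refine PySem.List.foldl_congr_mem S _ _ "" ?_
  intro m w hw
  dsimp only
  rw [hgd w hw]
  set cnt := word.toList.foldl (fun (v : Nat) c => stepN c w.toList v) 0 with hcnt
  have hiff : (cnt = w.toList.length) ↔ scanSub w.toList word.toList = true := by
    simpa using foldN_iff_scanSub w.toList word.toList 0 (Nat.zero_le _)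
  by_cases hs : scanSub w.toList word.toList = true
  · have hc : cnt = w.toList.length := hiff.mpr hs
    simp only [PySem.Str.len_eq, hc, pyMax2ByLen, hs, and_true]
    split_ifs <;> first | rfl | omega
  · have hlen : ¬ (w.length = cnt) :=
      fun h2 => hs (hiff.mp (by rw [String.length_toList]; exact h2.symm))
    simp [hs, hlen]

-- ===== VERDICT (by name: the statement is the Claim_ definition above) =====
theorem find_largest_word_spec : Claim_equal_find_largest_word := by
  intro word S _ hpre
  unfold Spec_find_largest_word
  exact portA_eq_portB word S hpre
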